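-- pv_equiv track=rewrite | github.com/GilbertAb/Computability-and-Complexity | Tarea_2/sudoku.py | are_duplicated_in_rows
-- ===== SOURCE A (Python) =====
-- def are_duplicated_in_rows(board):
--     duplicated = False
--     for row in board:
--         duplicated_nums = {num for num in row if row.count(num) > 1}
--         # if there's any duplicated num in the row
--         if (len(duplicated_nums) > 0 and not 0 in duplicated_nums):
--             duplicated = True
--             break
--     return duplicated
-- ===== SOURCE B (Python) =====
-- def are_duplicated_in_rows(board):
--     for row in board:
--         s = sorted(row)
--         has_dup = False
--         zero_dup = False
--         for a, b in zip(s, s[1:]):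
--             if a == b:
--                 has_dup = True
--                 if a == 0:
--                     zero_dup = True
--         if has_dup and not zero_dup:
--             return True
--     return False
-- ===== Notes on version B (the rewrite author's own statement) =====
-- stated objective: alternative
-- what changed: Replaces A's per-element row.count rescans and set comprehension with a sort of each row followed by a single adjacent-pair scan (duplicates are adjacent in a sorted copy), keeping the rule that a duplicated 0 suppresses the row.
import Mathlib
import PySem

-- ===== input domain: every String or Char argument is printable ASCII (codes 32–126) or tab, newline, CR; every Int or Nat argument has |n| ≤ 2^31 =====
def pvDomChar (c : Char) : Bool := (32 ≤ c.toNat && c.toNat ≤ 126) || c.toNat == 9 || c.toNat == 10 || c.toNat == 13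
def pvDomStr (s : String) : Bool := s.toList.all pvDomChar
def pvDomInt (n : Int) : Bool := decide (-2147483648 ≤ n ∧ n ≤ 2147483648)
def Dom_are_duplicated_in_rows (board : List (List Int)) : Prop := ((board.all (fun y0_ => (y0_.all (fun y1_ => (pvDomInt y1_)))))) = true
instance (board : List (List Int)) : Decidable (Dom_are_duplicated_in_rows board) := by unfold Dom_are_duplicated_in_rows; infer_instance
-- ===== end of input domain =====

-- B replaces A's per-element row.count rescans with a sort of each row plus one adjacent-pair scan.


-- ===== PORT A =====
-- {num for num in row if row.count(num) > 1}
def dupNumsA (row : List Int) : PySem.Set Int :=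
  PySem.Set.ofList (row.filter (fun num => decide (1 < PySem.List.count row num)))

-- the for-loop with its break: first row whose duplicate set is nonempty and lacks 0 yields True
def are_duplicated_in_rows (board : List (List Int)) : Bool :=
  match board with
  | [] => false
  | row :: rest =>
    let duplicated_nums := dupNumsA row
    if 0 < PySem.Set.len duplicated_nums && !(PySem.Set.contains duplicated_nums 0) then
      true
    else
      are_duplicated_in_rows rest

-- ===== PORT B =====
-- the inner 'for a, b in zip(s, s[1:])' loop updating (has_dup, zero_dup)
def scanAdjB (pairs : List (Int × Int)) (acc : Bool × Bool) : Bool × Bool :=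
  pairs.foldl (fun p ab => if ab.1 == ab.2 then (true, p.2 || (ab.1 == 0)) else p) acc

def are_duplicated_in_rows_alt (board : List (List Int)) : Bool :=
  match board with
  | [] => false
  | row :: rest =>
    let s := PySem.List.sorted row (fun x => x) false
    let hz := scanAdjB (s.zip s.tail) (false, false)
    if hz.1 && !hz.2 then true else are_duplicated_in_rows_alt rest

-- ===== PRECONDITION & SPEC =====
def Spec_are_duplicated_in_rows (board : List (List Int)) (out : Bool) : Prop := out = are_duplicated_in_rows_alt board
instance (board : List (List Int)) (out : Bool) : Decidable (Spec_are_duplicated_in_rows board out) := by unfold Spec_are_duplicated_in_rows; infer_instance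

-- ===== CLAIM (what is proved, stated in full; the proofs are below) =====
def Claim_equal_are_duplicated_in_rows : Prop := ∀ (board : List (List Int)), Dom_are_duplicated_in_rows board → Spec_are_duplicated_in_rows board (are_duplicated_in_rows board)

-- ===== LEMMAS AND PROOFS =====

-- the fold computes (acc.1 || some adjacent pair equal, acc.2 || some adjacent pair equal with value 0)
lemma scanAdjB_eq (pairs : List (Int × Int)) (acc : Bool × Bool) :
    scanAdjB pairs acc =
      (acc.1 || pairs.any (fun ab => ab.1 == ab.2),
       acc.2 || pairs.any (fun ab => ab.1 == ab.2 && ab.1 == 0)) := by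
  induction pairs generalizing acc with
  | nil => simp [scanAdjB]
  | cons ab t ih =>
    simp only [scanAdjB, List.foldl_cons, List.any_cons] at *
    by_cases h : ab.1 = ab.2
    · rw [if_pos (by simp [h]), ih]
      simp [h, Bool.or_assoc]
    · rw [if_neg (by simp [h]), ih]
      have hf : (ab.1 == ab.2) = false := by simp [h]
      simp [hf]

lemma count_eq_zero_of_lt_all (a : Int) (t : List Int) (h : ∀ x ∈ t, a < x) :
    t.count a = 0 := by
  rw [List.count_eq_zero]
  intro hmem
  exact absurd rfl (ne_of_lt (h a hmem))

-- in a ≤-sorted list, some adjacent pair is equal iff the list has a duplicate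
lemma anyAdjEq_iff (s : List Int) (hs : s.Pairwise (· ≤ ·)) :
    ((s.zip s.tail).any (fun ab => ab.1 == ab.2) = true) ↔ ¬ s.Nodup := by
  induction s with
  | nil => simp
  | cons a t ih =>
    cases t with
    | nil => simp
    | cons b t' =>
      rcases List.pairwise_cons.mp hs with ⟨hab, ht⟩
      have hab' : a ≤ b := hab b (List.mem_cons_self)
      by_cases h : a = b
      · subst h
        simp [List.zip]
      · have hlt : a < b := lt_of_le_of_ne hab' h
        have hnm : a ∉ b :: t' := by
          intro hm
          rcases List.mem_cons.mp hm with h1 | h1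
          · exact h h1
          · rcases List.pairwise_cons.mp ht with ⟨hb, _⟩
            exact absurd (lt_of_lt_of_le hlt (hb a h1)) (lt_irrefl a)
        have iht := ih ht
        simp only [List.tail_cons, List.zip_cons_cons, List.any_cons] at iht ⊢
        simp [h, iht, List.nodup_cons, hnm]

-- in a ≤-sorted list, some adjacent pair equals (0,0) iff 0 occurs at least twice
lemma anyAdjEqZero_iff (s : List Int) (hs : s.Pairwise (· ≤ ·)) :
    ((s.zip s.tail).any (fun ab => ab.1 == ab.2 && ab.1 == 0) = true) ↔ 2 ≤ s.count 0 := by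
  induction s with
  | nil => simp
  | cons a t ih =>
    cases t with
    | nil => by_cases h : a = 0 <;> simp [h, List.count_cons]
    | cons b t' =>
      rcases List.pairwise_cons.mp hs with ⟨hab, ht⟩
      have hab' : a ≤ b := hab b (List.mem_cons_self)
      have iht := ih ht
      simp only [List.tail_cons, List.zip_cons_cons, List.any_cons] at iht ⊢
      by_cases h0 : a = 0
      · subst h0
        by_cases h : (0 : Int) = b
        · subst h
          simp [List.count_cons]
        · have hz : (b :: t').count 0 = 0 := by
            apply count_eq_zero_of_lt_all
            intro x hx
            have hlt : (0 : Int) < b := lt_of_le_of_ne hab' h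
            rcases List.mem_cons.mp hx with h1 | h1
            · exact h1 ▸ hlt
            · rcases List.pairwise_cons.mp ht with ⟨hb, _⟩
              exact lt_of_lt_of_le hlt (hb x h1)
          rw [List.count_cons]
          simp [h, iht, hz]
      · rw [List.count_cons]
        simp [h0, iht]

-- A's per-row test equals B's per-row test
lemma row_cond_eq (row : List Int) :
    ((decide (0 < PySem.Set.len (dupNumsA row))) && !(PySem.Set.contains (dupNumsA row) 0)) =
      (let s := PySem.List.sorted row (fun x => x) false
       let hz := scanAdjB (s.zip s.tail) (false, false)
       hz.1 && !hz.2) := by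
  have hperm : (PySem.List.sorted row (fun x => x) false).Perm row :=
    PySem.List.sorted_perm row (fun x => x) false
  have hpw : (PySem.List.sorted row (fun x => x) false).Pairwise (· ≤ ·) := by
    have := PySem.List.sorted_pairwise (xs := row) (key := fun x => x)
    simpa using this
  simp only [scanAdjB_eq, Bool.false_or]
  have hmem : ∀ x, x ∈ dupNumsA row ↔ x ∈ row ∧ 1 < row.count x := by
    intro x
    unfold dupNumsA
    rw [PySem.Set.mem_ofList]
    simp [PySem.List.count]
  have hlenA : 0 < PySem.Set.len (dupNumsA row) ↔ ¬ row.Nodup := by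
    constructor
    · intro hl hn
      have : 0 < (dupNumsA row).length := by simpa [PySem.Set.len] using hl
      rcases List.exists_mem_of_length_pos this with ⟨x, hx⟩
      rcases (hmem x).mp hx with ⟨_, hc⟩
      exact absurd (List.nodup_iff_count_le_one.mp hn x) (by omega)
    · intro hn
      rcases not_forall.mp (fun h => hn (List.nodup_iff_count_le_one.mpr h)) with ⟨x, hx⟩
      have hx2 : 1 < row.count x := by omega
      have hxm : x ∈ row := List.count_pos_iff.mp (by omega)
      have : x ∈ dupNumsA row := (hmem x).mpr ⟨hxm, hx2⟩
      have := List.length_pos_of_mem this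
      simpa [PySem.Set.len] using this
  have hcontA : PySem.Set.contains (dupNumsA row) 0 = decide (2 ≤ row.count 0) := by
    have h1 : PySem.Set.contains (dupNumsA row) 0 = decide ((0 : Int) ∈ dupNumsA row) := by
      simp [PySem.Set.contains]
    rw [h1]
    rcases Decidable.em (2 ≤ row.count 0) with h | h
    · have hm : (0 : Int) ∈ row := List.count_pos_iff.mp (by omega)
      simp only [h, decide_true, decide_eq_true_eq]
      exact (hmem 0).mpr ⟨hm, by omega⟩
    · simp only [h, decide_false, decide_eq_false_iff_not]
      intro hc
      rcases (hmem 0).mp hc with ⟨_, hcnt⟩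
      omega
  have hB1 : ((PySem.List.sorted row (fun x => x) false).zip
        (PySem.List.sorted row (fun x => x) false).tail).any (fun ab => ab.1 == ab.2)
      = decide (¬ row.Nodup) := by
    have h := anyAdjEq_iff _ hpw
    rcases Decidable.em row.Nodup with hn | hn
    · have hnd : (PySem.List.sorted row (fun x => x) false).Nodup := hperm.nodup_iff.mpr hn
      simp only [hn, not_true, decide_false]
      rw [Bool.eq_false_iff]
      intro hc
      exact (h.mp hc) hnd
    · simp only [hn, not_false_iff, decide_true]
      exact h.mpr (fun hnd => hn (hperm.nodup_iff.mp hnd))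
  have hB2 : ((PySem.List.sorted row (fun x => x) false).zip
        (PySem.List.sorted row (fun x => x) false).tail).any
        (fun ab => ab.1 == ab.2 && ab.1 == 0)
      = decide (2 ≤ row.count 0) := by
    have hcnt : (PySem.List.sorted row (fun x => x) false).count 0 = row.count 0 :=
      hperm.count_eq 0
    have h := anyAdjEqZero_iff _ hpw
    rcases Decidable.em (2 ≤ row.count 0) with hh | hh
    · simp only [hh, decide_true]
      exact h.mpr (by omega)
    · simp only [hh, decide_false]
      rw [Bool.eq_false_iff]
      intro hc
      have := h.mp hc
      omega
  have hlenA' : decide (0 < PySem.Set.len (dupNumsA row)) = decide (¬ row.Nodup) :=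
    decide_eq_decide.mpr hlenA
  simp only [hB1, hB2, hlenA', hcontA]

-- the full loop equality (no hypotheses needed)
lemma loop_eq (board : List (List Int)) :
    are_duplicated_in_rows board = are_duplicated_in_rows_alt board := by
  induction board with
  | nil => rfl
  | cons row rest ih =>
    unfold are_duplicated_in_rows are_duplicated_in_rows_alt
    simp only []
    rw [← row_cond_eq row]
    split_ifs <;> simpa using ih

-- ===== VERDICT (by name: the statement is the Claim_ definition above) =====
theorem are_duplicated_in_rows_spec : Claim_equal_are_duplicated_in_rows := by
  intro board _
  exact loop_eq board
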